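-- pv_equiv track=rewrite | github.com/BenNiuX/Curtin_CS_ISAD5004_Introduction_to_Software_Engineering | code/life_path_number.py | add_digists
-- ===== SOURCE A (Python) =====
-- def add_digists(number):
--     '''
--     Calculate single digist from a number.
--     '''
--     if is_master_number(number):
--         return number
--     single_digist = 0
--     while number > 0:
--         digit = number % 10
--         single_digist += digit
--         number = number // 10
--     if single_digist >= 10:
--         return add_digists(single_digist)
--     return single_digist
--
-- def is_master_number(number):
--     '''
--     Check the number is a master number or not.
--     '''
--     master_nums = [11, 22, 33]
--     return number in master_nums
-- ===== SOURCE B (Python) =====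
-- def add_digists(number):
--     '''
--     Calculate single digist from a number.
--     '''
--     while number not in (11, 22, 33):
--         if number < 10:
--             return max(number, 0)
--         number = sum(int(c) for c in str(number))
--     return number
-- ===== Notes on version B (the rewrite author's own statement) =====
-- stated objective: simpler
-- what changed: Replaces the tail recursion plus arithmetic mod/floordiv accumulator loop by a flat while loop that sums the digits of str(number) and handles non-positive and single-digit inputs with one max(number, 0) early return.
import Mathlib
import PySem

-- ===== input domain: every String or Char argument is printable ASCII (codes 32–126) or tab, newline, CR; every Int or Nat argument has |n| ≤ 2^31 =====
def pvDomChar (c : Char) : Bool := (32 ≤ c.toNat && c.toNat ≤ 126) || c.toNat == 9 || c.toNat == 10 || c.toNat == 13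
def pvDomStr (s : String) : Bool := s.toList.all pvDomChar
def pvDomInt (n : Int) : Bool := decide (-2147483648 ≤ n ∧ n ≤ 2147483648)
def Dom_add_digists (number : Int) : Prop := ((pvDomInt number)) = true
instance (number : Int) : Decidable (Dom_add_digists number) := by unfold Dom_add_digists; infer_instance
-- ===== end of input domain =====

-- B replaces A's tail recursion + arithmetic accumulator digit loop by a flat while loop
-- that sums the digits of str(number), with one max(number, 0) early return; same values.
-- (Both loops are ported with a Nat fuel argument of number.toNat + 1, a totality guard
-- only: the fuel never runs out on the supplied value, as the lemmas below prove.)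

-- ===== PORT A =====
def is_master_number (number : Int) : Bool :=
  [(11 : Int), 22, 33].contains number

-- A's inner 'while number > 0' loop with accumulator single_digist
def add_digists_loop (fuel : Nat) (number : Int) (single_digist : Int) : Int :=
  match fuel with
  | 0 => single_digist
  | fuel + 1 =>
    if 0 < number then
      add_digists_loop fuel (PySem.Int.floordiv number 10) (single_digist + PySem.Int.mod number 10)
    else single_digist

-- A's tail recursion 'return add_digists(single_digist)'
def add_digists_go (fuel : Nat) (number : Int) : Int :=
  match fuel with
  | 0 => 0
  | fuel + 1 =>
    if is_master_number number then number
    else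
      let single_digist := add_digists_loop (number.toNat + 1) number 0
      if 10 ≤ single_digist then add_digists_go fuel single_digist
      else single_digist

def add_digists (number : Int) : Int :=
  add_digists_go (number.toNat + 1) number

-- ===== PORT B =====
-- int(c) for a one-character string c: exact on the decimal digit chars str(number) yields here
def py_digit_val (c : Char) : Int := (c.toNat : Int) - 48

-- sum(int(c) for c in str(number))
def py_str_digit_sum (number : Int) : Int :=
  ((PySem.Int.toStr number).toList.map py_digit_val).sum

-- B's 'while number not in (11, 22, 33)' loop, one step per round
def add_digists_alt_go (fuel : Nat) (number : Int) : Int :=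
  match fuel with
  | 0 => 0
  | fuel + 1 =>
    if number == 11 || number == 22 || number == 33 then number
    else if number < 10 then max number 0
    else add_digists_alt_go fuel (py_str_digit_sum number)

def add_digists_alt (number : Int) : Int :=
  add_digists_alt_go (number.toNat + 1) number

-- ===== PRECONDITION & SPEC =====
def Spec_add_digists (number : Int) (out : Int) : Prop := out = add_digists_alt number
instance (number : Int) (out : Int) : Decidable (Spec_add_digists number out) := by unfold Spec_add_digists; infer_instance

-- ===== CLAIM =====
def Claim_equal_add_digists : Prop := ∀ (number : Int), Dom_add_digists number → Spec_add_digists number (add_digists number)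

-- ===== LEMMAS AND PROOFS =====
-- digit sum of a natural number, the shared reference value of both loops
def natDigitSum (n : Nat) : Int :=
  ((Nat.digits 10 n).map (fun d => (d : Int))).sum

theorem natDigitSum_succ (n : Nat) (h : 0 < n) :
    natDigitSum n = ((n % 10 : Nat) : Int) + natDigitSum (n / 10) := by
  unfold natDigitSum
  rw [Nat.digits_def' (by norm_num : 1 < 10) h]
  simp

theorem natDigitSum_small (n : Nat) (h : n < 10) : natDigitSum n = (n : Int) := by
  by_cases hp : 0 < n
  · rw [natDigitSum_succ n hp]
    have h1 : n / 10 = 0 := Nat.div_eq_of_lt h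
    have h2 : n % 10 = n := Nat.mod_eq_of_lt h
    rw [h1, h2]
    simp [natDigitSum]
  · have : n = 0 := by omega
    simp [this, natDigitSum]

theorem natDigitSum_nonneg (n : Nat) : 0 ≤ natDigitSum n := by
  induction n using Nat.strong_induction_on with
  | _ n ih =>
    by_cases hp : 0 < n
    · rw [natDigitSum_succ n hp]
      have := ih (n / 10) (Nat.div_lt_self hp (by norm_num))
      omega
    · have : n = 0 := by omega
      simp [this, natDigitSum]

theorem natDigitSum_lt (n : Nat) (h : 10 ≤ n) : natDigitSum n < (n : Int) := by
  induction n using Nat.strong_induction_on with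
  | _ n ih =>
    rw [natDigitSum_succ n (by omega)]
    by_cases hq : n / 10 < 10
    · rw [natDigitSum_small _ hq]
      omega
    · have := ih (n / 10) (Nat.div_lt_self (by omega) (by norm_num)) (by omega)
      omega

-- A's accumulator loop computes the digit sum of number.toNat (given enough fuel)
theorem add_digists_loop_eq (fuel : Nat) : ∀ (number single_digist : Int),
    number.toNat < fuel →
    add_digists_loop fuel number single_digist = single_digist + natDigitSum number.toNat := by
  induction fuel with
  | zero => intro number single_digist h; omega
  | succ fuel ih =>
    intro number single_digist h
    rw [add_digists_loop]
    split
    next hpos =>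
      have hfd : PySem.Int.floordiv number 10 = number / 10 :=
        PySem.Int.floordiv_eq_ediv_of_pos (by norm_num)
      have hmd : PySem.Int.mod number 10 = number % 10 :=
        PySem.Int.mod_eq_emod_of_pos (by norm_num)
      rw [hfd, hmd, ih (number / 10) _ (by omega)]
      have hq : (number / 10).toNat = number.toNat / 10 := by omega
      rw [hq, natDigitSum_succ number.toNat (by omega)]
      have hm : number % 10 = ((number.toNat % 10 : Nat) : Int) := by omega
      rw [hm]
      ring
    next hpos =>
      have hz : number.toNat = 0 := by omega
      rw [hz]
      simp [natDigitSum]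

theorem digitChar_val (d : Nat) (h : d < 10) : py_digit_val (Nat.digitChar d) = (d : Int) := by
  interval_cases d <;> decide

-- character sum of Nat.toDigitsCore, given enough fuel
theorem toDigitsCore_val_sum (f : Nat) : ∀ (n : Nat) (l : List Char), n < f →
    ((Nat.toDigitsCore 10 f n l).map py_digit_val).sum
      = natDigitSum n + (l.map py_digit_val).sum := by
  induction f with
  | zero => intro n l h; omega
  | succ f ih =>
    intro n l h
    rw [Nat.toDigitsCore]
    by_cases hq : n / 10 = 0
    · rw [if_pos hq]
      have hm : n % 10 = n := by omega
      have hlt : n < 10 := by omega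
      simp only [List.map_cons, List.sum_cons, hm, digitChar_val n hlt]
      rw [natDigitSum_small n hlt]
    · rw [if_neg hq]
      rw [ih (n / 10) _ (by omega)]
      simp only [List.map_cons, List.sum_cons, digitChar_val (n % 10) (by omega)]
      rw [natDigitSum_succ n (by omega)]
      ring

theorem py_str_digit_sum_eq (number : Int) (h : 0 ≤ number) :
    py_str_digit_sum number = natDigitSum number.toNat := by
  unfold py_str_digit_sum
  rw [PySem.Int.toList_toStr]
  unfold PySem.Int.toChars
  rw [if_neg (by omega)]
  unfold Nat.toDigits
  rw [toDigitsCore_val_sum (number.toNat + 1) number.toNat [] (by omega)]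
  simp

-- the two outer loops agree, by induction on the (sufficient) fuel
theorem go_eq_alt_go (fuel : Nat) : ∀ (number : Int), number.toNat < fuel →
    add_digists_go fuel number = add_digists_alt_go fuel number := by
  induction fuel with
  | zero => intro number h; omega
  | succ fuel ih =>
    intro number h
    rw [add_digists_go, add_digists_alt_go]
    have hm : (is_master_number number = true) ↔
        ((number == 11 || number == 22 || number == 33) = true) := by
      simp [is_master_number, or_assoc]
    by_cases hmast : number = 11 ∨ number = 22 ∨ number = 33
    · have hb : (number == 11 || number == 22 || number == 33) = true := by
        simp only [Bool.or_eq_true, beq_iff_eq]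
        tauto
      rw [if_pos (hm.mpr hb), if_pos hb]
    · have hb : (number == 11 || number == 22 || number == 33) = false := by
        simp only [Bool.or_eq_false_iff, beq_eq_false_iff_ne]
        rw [not_or, not_or] at hmast
        exact ⟨⟨hmast.1, hmast.2.1⟩, hmast.2.2⟩
      have hmf : is_master_number number = false := by
        cases hc : is_master_number number
        · rfl
        · rw [hm.mp hc] at hb; exact absurd hb (by simp)
      rw [hmf, hb]
      simp only [Bool.false_eq_true, if_false]
      have hs := add_digists_loop_eq (number.toNat + 1) number 0 (by omega)
      rw [zero_add] at hs
      by_cases hsmall : number < 10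
      · -- A's loop leaves the digit sum, which is max number 0 here
        have hval : add_digists_loop (number.toNat + 1) number 0 = max number 0 := by
          rw [hs]
          by_cases hp : 0 < number
          · rw [natDigitSum_small number.toNat (by omega)]; omega
          · have hz : number.toNat = 0 := by omega
            rw [hz]; simp [natDigitSum]; omega
        rw [if_pos hsmall, if_neg (by omega)]
        exact hval
      · rw [if_neg hsmall]
        rw [py_str_digit_sum_eq number (by omega), ← hs]
        by_cases h10 : 10 ≤ add_digists_loop (number.toNat + 1) number 0
        · rw [if_pos h10]
          have hlt : (add_digists_loop (number.toNat + 1) number 0).toNat < fuel := by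
            have := natDigitSum_lt number.toNat (by omega)
            omega
          exact ih (add_digists_loop (number.toNat + 1) number 0) hlt
        · rw [if_neg h10]
          -- the reduced sum is below 10, B's loop exits on the next round
          have hnn : 0 ≤ add_digists_loop (number.toNat + 1) number 0 := by
            rw [hs]; exact natDigitSum_nonneg _
          cases fuel with
          | zero =>
            -- enough fuel: number ≥ 10 forces 1 ≤ number.toNat < fuel + 1
            omega
          | succ fuel =>
            rw [add_digists_alt_go]
            rw [if_neg (by simp only [Bool.or_eq_true, beq_iff_eq]; omega),
              if_pos (by omega)]
            omega

-- both ports agree: the fuels match at the top level and A's recursive calls shrink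
theorem add_digists_eq_alt (number : Int) : add_digists number = add_digists_alt number := by
  unfold add_digists add_digists_alt
  exact go_eq_alt_go (number.toNat + 1) number (by omega)

-- ===== VERDICT =====
theorem add_digists_spec : Claim_equal_add_digists := by
  intro number _
  exact add_digists_eq_alt number
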